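-- pv_equiv track=rewrite | github.com/e-CUDS/cif-demo | softcuds.py | get_element_dict
-- ===== SOURCE A (Python) =====
-- def get_element_dict(cuds, key, include_parent):
--     """Returns a dict with the content of the CUDS element `key`.  If
--     `include_parent` is true, the attributes of parent elements will
--     also be included."""
--     cudsdict = cuds['CUDS_KEYS']
--     element_dict = cudsdict[key].copy()
--     parentname = element_dict['parent']
--     if include_parent:
--         parent = element_dict.pop('parent')
--         while parent:
--             parentdict = cudsdict[stripname(parent)]
--             for k, v in parentdict.items():
--                 element_dict.setdefault(k, v)
--             parent = element_dict.pop('parent')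
--     element_dict['parent'] = parentname
--     return element_dict
--
-- def stripname(name):
--     """Returns name with initial "CUBA." stripped of."""
--     return name[5:] if name.startswith('CUBA.') else name
-- ===== SOURCE B (Python) =====
-- def stripname(name):
--     """Returns name with initial "CUBA." stripped of."""
--     return name[5:] if name.startswith('CUBA.') else name
--
--
-- def get_element_dict(cuds, key, include_parent):
--     """Returns a dict with the content of the CUDS element `key`.  If
--     `include_parent` is true, the attributes of parent elements will
--     also be included."""
--     cudsdict = cuds['CUDS_KEYS']
--     parentname = cudsdict[key]['parent']
--     if not include_parent:
--         return dict(cudsdict[key])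
--     # First pass: build the inheritance chain of element names.
--     chain = [key]
--     p = parentname
--     while p:
--         name = stripname(p)
--         chain.append(name)
--         p = cudsdict[name]['parent']
--     # Second pass: merge the chain, nearer elements winning.
--     result = {}
--     for name in chain:
--         for k, v in cudsdict[name].items():
--             if k != 'parent':
--                 result.setdefault(k, v)
--     result['parent'] = parentname
--     return result
-- ===== Notes on version B (the rewrite author's own statement) =====
-- stated objective: alternative
-- what changed: B separates the work into two passes - it first follows the parent links to build the explicit inheritance chain of element names, then merges the chain's dicts front-to-back with setdefault into a fresh dict - instead of A's single destructive loop that repeatedly pops 'parent' out of a mutated copy of the key's dict.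
import Mathlib
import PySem

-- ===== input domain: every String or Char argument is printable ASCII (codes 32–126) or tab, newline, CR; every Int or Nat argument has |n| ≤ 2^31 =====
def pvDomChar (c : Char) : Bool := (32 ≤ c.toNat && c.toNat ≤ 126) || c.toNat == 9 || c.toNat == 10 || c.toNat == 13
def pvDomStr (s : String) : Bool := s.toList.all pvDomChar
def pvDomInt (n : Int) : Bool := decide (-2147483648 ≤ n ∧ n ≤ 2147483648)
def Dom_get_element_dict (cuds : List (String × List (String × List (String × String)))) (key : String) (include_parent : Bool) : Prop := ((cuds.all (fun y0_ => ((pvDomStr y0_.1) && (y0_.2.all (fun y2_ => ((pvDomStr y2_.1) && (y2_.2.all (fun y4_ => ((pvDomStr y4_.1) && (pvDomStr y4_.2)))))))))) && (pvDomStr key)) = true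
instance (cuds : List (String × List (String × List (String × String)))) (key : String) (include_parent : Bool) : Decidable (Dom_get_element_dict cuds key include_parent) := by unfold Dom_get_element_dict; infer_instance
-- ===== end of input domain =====

-- B builds the inheritance chain of element names first, then merges the chain's dicts with
-- setdefault into a fresh dict (two passes), instead of A's destructive pop-and-merge loop.


-- ===== PORT A =====
-- stripname, shared by both Pythons
def pvStrip (name : String) : String :=
  if PySem.Str.startswith name "CUBA." then PySem.Str.slice name (some 5) none else name

-- A's while loop: merge parentdict with setdefault, then pop 'parent' again (none = KeyError / fuel out)
def pvLoopA (cudsdict : PySem.Dict String (PySem.Dict String String)) :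
    Nat → PySem.Dict String String → String → Option (PySem.Dict String String)
  | 0, _, _ => none
  | fuel+1, ed, parent =>
    if parent = "" then some ed
    else
      match cudsdict.get? (pvStrip parent) with
      | none => none
      | some pd =>
        match (pd.items.foldl (fun e kv => e.setdefault kv.1 kv.2) ed).pop? "parent" with
        | none => none
        | some pr => pvLoopA cudsdict fuel pr.2 pr.1

def get_element_dict (cuds : List (String × List (String × List (String × String)))) (key : String) (include_parent : Bool) : List (String × String) :=
  match (PySem.Dict.mk cuds).get? "CUDS_KEYS" with
  | none => []            -- KeyError in Python: outside Pre_
  | some cl =>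
    let cudsdict : PySem.Dict String (PySem.Dict String String) :=
      PySem.Dict.mk (cl.map (fun p => (p.1, PySem.Dict.mk p.2)))
    match cudsdict.get? key with
    | none => []          -- KeyError
    | some element_dict =>
      match element_dict.get? "parent" with
      | none => []        -- KeyError
      | some parentname =>
        if include_parent then
          match element_dict.pop? "parent" with
          | none => []    -- unreachable ('parent' was just read)
          | some pr =>
            match pvLoopA cudsdict (cudsdict.size + 1) pr.2 pr.1 with
            | none => []  -- KeyError or infinite loop: outside Pre_
            | some ed => (ed.insert "parent" parentname).items
        else (element_dict.insert "parent" parentname).items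

-- ===== PORT B =====
-- B's first pass: the chain of stripped parent names followed from p (none = KeyError / fuel out)
def pvChain? (cudsdict : PySem.Dict String (PySem.Dict String String)) :
    Nat → String → Option (List String)
  | 0, _ => none
  | fuel+1, p =>
    if p = "" then some []
    else
      match cudsdict.get? (pvStrip p) with
      | none => none
      | some pd =>
        match pd.get? "parent" with
        | none => none
        | some p' => (pvChain? cudsdict fuel p').map (pvStrip p :: ·)

-- B's second pass, one chain element: setdefault every non-'parent' item of cudsdict[name]
def pvMerge (cudsdict : PySem.Dict String (PySem.Dict String String))
    (r : PySem.Dict String String) (name : String) : PySem.Dict String String :=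
  match cudsdict.get? name with
  | none => r             -- unreachable for chain names (verified during the first pass)
  | some d => d.items.foldl (fun r kv => if kv.1 = "parent" then r else r.setdefault kv.1 kv.2) r

def get_element_dict_alt (cuds : List (String × List (String × List (String × String)))) (key : String) (include_parent : Bool) : List (String × String) :=
  match (PySem.Dict.mk cuds).get? "CUDS_KEYS" with
  | none => []
  | some cl =>
    let cudsdict : PySem.Dict String (PySem.Dict String String) :=
      PySem.Dict.mk (cl.map (fun p => (p.1, PySem.Dict.mk p.2)))
    match cudsdict.get? key with
    | none => []
    | some kd =>
      match kd.get? "parent" with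
      | none => []
      | some parentname =>
        if include_parent then
          match pvChain? cudsdict (cudsdict.size + 1) parentname with
          | none => []
          | some rest =>
            ((((key :: rest).foldl (pvMerge cudsdict) PySem.Dict.empty).insert "parent" parentname)).items
        else kd.items

-- ===== PRECONDITION & SPEC =====
-- Pre_ excludes: association lists with duplicate keys at any level (they do not represent Python
-- dicts); inputs where 'CUDS_KEYS', `key` or the key's 'parent' entry is missing (KeyError in A);
-- and, when include_parent, parent chains that hit a missing element or missing 'parent' key
-- (KeyError) or that cycle (A loops forever) — a terminating chain is repetition-free, hence
-- reaches the root '' within |cudsdict| applications of the one-step parent link pvStep.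
-- one step along the parent links: '' (root reached) is kept, a broken link is none
def pvStep (cudsdict : PySem.Dict String (PySem.Dict String String)) :
    Option String → Option String
  | none => none
  | some p => if p = "" then some "" else (cudsdict.get? (pvStrip p)).bind (fun d => d.get? "parent")

def pvPreB (cuds : List (String × List (String × List (String × String)))) (key : String) (include_parent : Bool) : Bool :=
  decide ((cuds.map Prod.fst).Nodup) &&
  cuds.all (fun p => decide ((p.2.map Prod.fst).Nodup) &&
    p.2.all (fun q => decide ((q.2.map Prod.fst).Nodup))) &&
  (match (PySem.Dict.mk cuds).get? "CUDS_KEYS" with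
   | none => false
   | some cl =>
     let cudsdict : PySem.Dict String (PySem.Dict String String) :=
       PySem.Dict.mk (cl.map (fun p => (p.1, PySem.Dict.mk p.2)))
     match cudsdict.get? key with
     | none => false
     | some kd =>
       match kd.get? "parent" with
       | none => false
       | some parentname =>
         !include_parent ||
           decide ((pvStep cudsdict)^[cudsdict.size] (some parentname) = some ""))

def Pre_get_element_dict (cuds : List (String × List (String × List (String × String)))) (key : String) (include_parent : Bool) : Prop :=
  pvPreB cuds key include_parent = true
instance (cuds : List (String × List (String × List (String × String)))) (key : String) (include_parent : Bool) : Decidable (Pre_get_element_dict cuds key include_parent) := by unfold Pre_get_element_dict; infer_instance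

def pvWitness_get_element_dict : (List (String × List (String × List (String × String)))) × String × Bool :=
  ([("CUDS_KEYS", [("Atom", [("parent", "CUBA.Entity"), ("mass", "1")]),
                   ("Entity", [("parent", ""), ("uid", "0")])])], "Atom", true)

def Spec_get_element_dict (cuds : List (String × List (String × List (String × String)))) (key : String) (include_parent : Bool) (out : List (String × String)) : Prop := out = get_element_dict_alt cuds key include_parent
instance (cuds : List (String × List (String × List (String × String)))) (key : String) (include_parent : Bool) (out : List (String × String)) : Decidable (Spec_get_element_dict cuds key include_parent out) := by unfold Spec_get_element_dict; infer_instance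

-- ===== CLAIM (what is proved, stated in full; the proofs are below) =====
def Claim_equal_get_element_dict : Prop := ∀ (cuds : List (String × List (String × List (String × String)))) (key : String) (include_parent : Bool), Dom_get_element_dict cuds key include_parent → Pre_get_element_dict cuds key include_parent → Spec_get_element_dict cuds key include_parent (get_element_dict cuds key include_parent)

-- ===== LEMMAS AND PROOFS =====

-- abbreviations used only in the proofs
def pvSd (e : PySem.Dict String String) (kv : String × String) : PySem.Dict String String :=
  e.setdefault kv.1 kv.2
def pvSdSkip (e : PySem.Dict String String) (kv : String × String) : PySem.Dict String String :=
  if kv.1 = "parent" then e else e.setdefault kv.1 kv.2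

theorem pv_erase_of_not_contains (d : PySem.Dict String String)
    (h : d.contains "parent" = false) : d.erase "parent" = d := by
  simp only [PySem.Dict.contains, List.any_eq_false] at h
  apply PySem.Dict.ext
  simp only [PySem.Dict.erase]
  exact List.filter_eq_self.mpr (by intro a ha; simpa using h a ha)

theorem pv_contains_erase (ed : PySem.Dict String String) (k : String) (hk : ¬ k = "parent") :
    (ed.erase "parent").contains k = ed.contains k := by
  cases ed with | mk l =>
  induction l with
  | nil => rfl
  | cons a t ih =>
    simp only [PySem.Dict.erase, PySem.Dict.contains] at *
    by_cases h : a.1 = "parent"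
    · have hak : (a.1 == k) = false := by
        rw [h]; exact beq_eq_false_iff_ne.mpr (Ne.symm hk)
      rw [List.filter_cons, show (!(a.1 == "parent")) = false by simp [h]]
      simp only [Bool.false_eq_true, if_false]
      rw [ih, List.any_cons, hak, Bool.false_or]
    · have hne : (a.1 == "parent") = false := by simpa using h
      simp [hne, ih]

theorem pv_setdefault_erase (ed : PySem.Dict String String) (k v : String) (hk : ¬ k = "parent") :
    (ed.setdefault k v).erase "parent" = (ed.erase "parent").setdefault k v := by
  by_cases h : ed.contains k = true
  · rw [PySem.Dict.setdefault_of_contains _ _ h,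
      PySem.Dict.setdefault_of_contains _ _ (by rw [pv_contains_erase _ _ hk]; exact h)]
  · have h' : ed.contains k = false := by simpa using h
    have hck : (ed.erase "parent").contains k = false := by rw [pv_contains_erase _ _ hk]; exact h'
    rw [PySem.Dict.setdefault_of_not_contains _ _ h',
      PySem.Dict.setdefault_of_not_contains _ _ hck]
    apply PySem.Dict.ext
    rw [PySem.Dict.items_insert_of_not_contains _ _ hck]
    have hkb : (k == "parent") = false := by simpa using hk
    simp [PySem.Dict.insert, PySem.Dict.erase, h', List.filter_append, hkb]

theorem pv_setdefault_parent_erase (ed : PySem.Dict String String) (v : String) :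
    (ed.setdefault "parent" v).erase "parent" = ed.erase "parent" := by
  by_cases h : ed.contains "parent" = true
  · rw [PySem.Dict.setdefault_of_contains _ _ h]
  · have h' : ed.contains "parent" = false := by simpa using h
    rw [PySem.Dict.setdefault_of_not_contains _ _ h']
    apply PySem.Dict.ext
    simp only [PySem.Dict.erase]
    rw [PySem.Dict.items_insert_of_not_contains _ _ h']
    simp [List.filter_append]

theorem pv_erase_foldl (items : List (String × String)) : ∀ (ed : PySem.Dict String String),
    (items.foldl pvSd ed).erase "parent" = items.foldl pvSdSkip (ed.erase "parent") := by
  induction items with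
  | nil => intro ed; simp
  | cons a t ih =>
    intro ed
    by_cases h : a.1 = "parent"
    · have h2 : pvSd ed a = ed.setdefault "parent" a.2 := by simp [pvSd, h]
      simp only [List.foldl_cons, h2, ih, pvSdSkip, if_pos h, pv_setdefault_parent_erase]
    · simp only [List.foldl_cons, pvSd, pvSdSkip, if_neg h, ih, pv_setdefault_erase ed a.1 a.2 h]

theorem pv_contains_foldl_skip (items : List (String × String)) : ∀ (ed : PySem.Dict String String),
    ed.contains "parent" = false →
    (items.foldl pvSdSkip ed).contains "parent" = false := by
  induction items with
  | nil => intro ed h; simpa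
  | cons a t ih =>
    intro ed h
    by_cases hk : a.1 = "parent"
    · simpa [pvSdSkip, hk] using ih ed h
    · simp only [List.foldl_cons, pvSdSkip, if_neg hk]
      refine ih _ ?_
      rw [PySem.Dict.contains_setdefault]
      simp [h, Ne.symm hk]

theorem pv_get_setdefault_of_contains (d : PySem.Dict String String) (k v : String)
    (h : d.contains "parent" = true) :
    (d.setdefault k v).get? "parent" = d.get? "parent" := by
  by_cases hk : ("parent" : String) = k
  · rw [← hk, PySem.Dict.setdefault_of_contains _ _ h]
  · exact PySem.Dict.get?_setdefault_of_ne _ _ hk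

theorem pv_get_foldl (items : List (String × String)) : ∀ (ed : PySem.Dict String String),
    ed.contains "parent" = false → ∀ (q : String × String),
    items.find? (fun p => p.1 == "parent") = some q →
    (items.foldl pvSd ed).get? "parent" = some q.2 := by
  induction items with
  | nil => intro ed h q hf; simp at hf
  | cons a t ih =>
    intro ed h q hf
    by_cases hk : a.1 = "parent"
    · rw [List.find?_cons_of_pos (by simpa using hk)] at hf
      cases hf
      have hd : pvSd ed a = ed.insert "parent" a.2 := by
        simp only [pvSd, hk]; exact PySem.Dict.setdefault_of_not_contains _ _ h
      have hcontains : (pvSd ed a).contains "parent" = true := by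
        rw [hd]; exact PySem.Dict.contains_insert_self _ _ _
      have hget : (pvSd ed a).get? "parent" = some a.2 := by
        rw [hd]; exact PySem.Dict.get?_insert_self _ _ _
      -- fold over t preserves the existing 'parent' entry
      clear ih
      have : ∀ (l : List (String × String)) (d : PySem.Dict String String),
          d.contains "parent" = true →
          (l.foldl pvSd d).get? "parent" = d.get? "parent" := by
        intro l
        induction l with
        | nil => intro d hd; rfl
        | cons b s ihs =>
          intro d hd
          rw [List.foldl_cons]
          rw [ihs _ (by rw [show pvSd d b = d.setdefault b.1 b.2 from rfl,
            PySem.Dict.contains_setdefault]; simp [hd])]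
          exact pv_get_setdefault_of_contains _ _ _ hd
      rw [List.foldl_cons, this t _ hcontains, hget]
    · rw [List.find?_cons_of_neg (by simpa using hk)] at hf
      rw [List.foldl_cons]
      refine ih _ ?_ q hf
      rw [show pvSd ed a = ed.setdefault a.1 a.2 from rfl, PySem.Dict.contains_setdefault]
      simp [h, Ne.symm hk]

theorem pv_contains_foldl_none (items : List (String × String)) : ∀ (ed : PySem.Dict String String),
    ed.contains "parent" = false →
    items.find? (fun p => p.1 == "parent") = none →
    (items.foldl pvSd ed).contains "parent" = false := by
  induction items with
  | nil => intro ed h _; simpa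
  | cons a t ih =>
    intro ed h hf
    rw [List.find?_cons] at hf
    by_cases hk : (a.1 == "parent") = true
    · simp [hk] at hf
    · simp only [hk] at hf
      rw [List.foldl_cons]
      refine ih _ ?_ hf
      rw [show pvSd ed a = ed.setdefault a.1 a.2 from rfl, PySem.Dict.contains_setdefault]
      simp [h]
      intro e; rw [e] at hk; simp at hk

theorem pv_skip_from_empty (items : List (String × String)) : ∀ (d : PySem.Dict String String),
    (∀ p ∈ items, d.contains p.1 = false) → (items.map Prod.fst).Nodup →
    items.foldl pvSdSkip d
      = PySem.Dict.mk (d.items ++ items.filter (fun p => !(p.1 == "parent"))) := by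
  induction items with
  | nil => intro d _ _; simp
  | cons a t ih =>
    intro d hfresh hnd
    have hfr := List.forall_mem_cons.mp hfresh
    simp only [List.map_cons, List.nodup_cons] at hnd
    by_cases hk : a.1 = "parent"
    · rw [List.foldl_cons, show pvSdSkip d a = d by simp [pvSdSkip, hk],
        ih d hfr.2 hnd.2]
      congr 1
      rw [List.filter_cons, show (!(a.1 == "parent")) = false by simp [hk]]
      simp
    · have hc : d.contains a.1 = false := hfr.1
      rw [List.foldl_cons, show pvSdSkip d a = d.insert a.1 a.2 by
        simp only [pvSdSkip, if_neg hk]; exact PySem.Dict.setdefault_of_not_contains _ _ hc]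
      rw [ih (d.insert a.1 a.2) ?_ hnd.2]
      · rw [PySem.Dict.items_insert_of_not_contains _ _ hc]
        rw [List.filter_cons, show (!(a.1 == "parent")) = true by simp [hk]]
        simp
      · intro p hp
        rw [PySem.Dict.contains_insert]
        have h1 : (p.1 == a.1) = false := by
          have : p.1 ∈ t.map Prod.fst := List.mem_map_of_mem hp
          exact beq_eq_false_iff_ne.mpr (fun e => hnd.1 (e ▸ this))
        rw [h1, Bool.false_or]
        exact hfr.2 p hp

theorem pv_insert_self (d : PySem.Dict String String) (v : String)
    (hg : d.get? "parent" = some v) (hnd : d.keys.Nodup) :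
    d.insert "parent" v = d := by
  have hc : d.contains "parent" = true := by
    rw [PySem.Dict.contains_eq_isSome_get?, hg]; rfl
  apply PySem.Dict.ext
  rw [PySem.Dict.items_insert_of_contains _ _ hc]
  have hmap : ∀ p ∈ d.items,
      (if (p.1 == "parent") = true then (("parent" : String), v) else p) = p := by
    intro p hp
    obtain ⟨pk, pv⟩ := p
    by_cases h : (pk == "parent") = true
    · have hp1 : pk = "parent" := beq_iff_eq.mp h
      have hgv : d.get? pk = some pv := PySem.Dict.get?_of_mem_items d hp hnd
      rw [hp1, hg] at hgv
      simp only [if_pos h]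
      rw [← hp1, (Option.some_inj.mp hgv)]
    · simp [h]
  rw [List.map_congr_left hmap]; exact List.map_id' d.items

theorem pv_contains_erase_self (d : PySem.Dict String String) :
    (d.erase "parent").contains "parent" = false := by
  simp only [PySem.Dict.erase, PySem.Dict.contains, List.any_eq_false]
  intro p hp
  have := List.of_mem_filter hp
  simpa using this

theorem pv_mem_of_get? (d : PySem.Dict String (PySem.Dict String String)) (k : String)
    (v : PySem.Dict String String) (h : d.get? k = some v) :
    ∃ q ∈ d.items, q.2 = v ∧ q.1 = k := by
  simp only [PySem.Dict.get?] at h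
  cases hf : d.items.find? (fun p => p.1 == k) with
  | none => rw [hf] at h; simp at h
  | some q =>
    rw [hf] at h
    refine ⟨q, List.mem_of_find?_eq_some hf, by simpa using h, ?_⟩
    have := List.find?_some hf
    simpa using this

theorem pv_loop_eq (cudsdict : PySem.Dict String (PySem.Dict String String)) :
    ∀ (fuel : Nat) (p : String) (ed : PySem.Dict String String),
      ed.contains "parent" = false →
      pvLoopA cudsdict fuel ed p
        = (pvChain? cudsdict fuel p).map (fun rest => rest.foldl (pvMerge cudsdict) ed) := by
  intro fuel
  induction fuel with
  | zero => intro p ed h; rfl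
  | succ n ih =>
    intro p ed h
    by_cases hp : p = ""
    · simp [pvLoopA, pvChain?, hp]
    · rw [pvLoopA, pvChain?]
      simp only [if_neg hp]
      cases hg : cudsdict.get? (pvStrip p) with
      | none => rfl
      | some pd =>
        dsimp only
        have hfoldl : pd.items.foldl (fun e kv => e.setdefault kv.1 kv.2) ed
            = pd.items.foldl pvSd ed := rfl
        cases hgp : pd.get? "parent" with
        | none =>
          have hfn : pd.items.find? (fun q => q.1 == "parent") = none := by
            simp only [PySem.Dict.get?, Option.map_eq_none_iff] at hgp
            exact hgp
          have hcf := pv_contains_foldl_none pd.items ed h hfn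
          have hgn : (pd.items.foldl pvSd ed).get? "parent" = none :=
            (PySem.Dict.get?_eq_none_iff_contains _ _).mpr hcf
          rw [hfoldl]
          simp [PySem.Dict.pop?, hgn]
        | some p' =>
          obtain ⟨q, hfq, hq2⟩ : ∃ q, pd.items.find? (fun r => r.1 == "parent") = some q ∧ q.2 = p' := by
            simp only [PySem.Dict.get?, Option.map_eq_some_iff] at hgp
            obtain ⟨q, h1, h2⟩ := hgp
            exact ⟨q, h1, h2⟩
          have hget := pv_get_foldl pd.items ed h q hfq
          have herase : (pd.items.foldl pvSd ed).erase "parent"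
              = pd.items.foldl pvSdSkip ed := by
            rw [pv_erase_foldl, pv_erase_of_not_contains ed h]
          rw [hfoldl]
          have hpop : (pd.items.foldl pvSd ed).pop? "parent"
              = some (p', pd.items.foldl pvSdSkip ed) := by
            simp [PySem.Dict.pop?, hget, hq2, herase]
          rw [hpop]
          dsimp only
          rw [ih p' _ (pv_contains_foldl_skip pd.items ed h)]
          cases pvChain? cudsdict n p' with
          | none => rfl
          | some rest =>
            simp only [Option.map_some, List.foldl_cons]
            congr 1
            simp [pvMerge, hg]
            rfl

theorem pv_iterate_none (cudsdict : PySem.Dict String (PySem.Dict String String)) :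
    ∀ n : Nat, (pvStep cudsdict)^[n] none = none := by
  intro n
  induction n with
  | zero => rfl
  | succ n ih => rw [Function.iterate_succ_apply, show pvStep cudsdict none = none from rfl, ih]

theorem pv_iterate_root (cudsdict : PySem.Dict String (PySem.Dict String String)) :
    ∀ n : Nat, (pvStep cudsdict)^[n] (some "") = some "" := by
  intro n
  induction n with
  | zero => rfl
  | succ n ih => rw [Function.iterate_succ_apply, show pvStep cudsdict (some "") = some "" by simp [pvStep], ih]

theorem pv_chain_iff (cudsdict : PySem.Dict String (PySem.Dict String String)) :
    ∀ (n : Nat) (p : String),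
      (pvChain? cudsdict (n + 1) p).isSome = true ↔ (pvStep cudsdict)^[n] (some p) = some "" := by
  intro n
  induction n with
  | zero =>
    intro p
    by_cases hp : p = ""
    · simp [pvChain?, hp]
    · have hnone : pvChain? cudsdict 1 p = none := by
        simp only [pvChain?, if_neg hp]
        cases cudsdict.get? (pvStrip p) with
        | none => rfl
        | some pd =>
          dsimp only
          cases pd.get? "parent" <;> rfl
      simp [hnone, hp]
  | succ n ih =>
    intro p
    by_cases hp : p = ""
    · rw [Function.iterate_succ_apply, show pvStep cudsdict (some p) = some "" by simp [pvStep, hp]]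
      simp [pvChain?, hp, pv_iterate_root]
    · rw [Function.iterate_succ_apply]
      rw [show pvStep cudsdict (some p)
          = (cudsdict.get? (pvStrip p)).bind (fun d => d.get? "parent") by simp [pvStep, hp]]
      cases hg : cudsdict.get? (pvStrip p) with
      | none => simp [pvChain?, hp, hg, pv_iterate_none]
      | some pd =>
        cases hgp : pd.get? "parent" with
        | none => simp [pvChain?, hp, hg, hgp, pv_iterate_none]
        | some p' =>
          simp only [pvChain?, if_neg hp, hg, hgp, Option.bind_some, Option.isSome_map]
          exact ih p'

theorem pv_cuds_nodup (cuds : List (String × List (String × List (String × String))))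
    (cl : List (String × List (String × String)))
    (hall : ∀ p ∈ cuds, (∀ q ∈ p.2, (q.2.map Prod.fst).Nodup))
    (hcl : (PySem.Dict.mk cuds).get? "CUDS_KEYS" = some cl) :
    ∀ name d, (PySem.Dict.mk (cl.map (fun p => (p.1, PySem.Dict.mk p.2)))).get? name = some d →
      d.keys.Nodup := by
  intro name d hd
  obtain ⟨q, hq, hq2, _⟩ := pv_mem_of_get? _ _ _ hd
  simp only [List.mem_map] at hq
  obtain ⟨r, hr, hrq⟩ := hq
  obtain ⟨p0, hp0, hp02, _⟩ :
      ∃ p0, p0 ∈ cuds ∧ p0.2 = cl ∧ p0.1 = "CUDS_KEYS" := by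
    simp only [PySem.Dict.get?] at hcl
    cases hf : cuds.find? (fun p => p.1 == "CUDS_KEYS") with
    | none => rw [hf] at hcl; simp at hcl
    | some p0 =>
      rw [hf] at hcl
      exact ⟨p0, List.mem_of_find?_eq_some hf, by simpa using hcl,
        by simpa using List.find?_some hf⟩
  have : d = PySem.Dict.mk r.2 := by rw [← hq2, ← hrq]
  rw [this]
  exact hall p0 hp0 r (by rw [hp02]; exact hr)

-- ===== VERDICT (by name: the statement is the Claim_ definition above) =====
theorem get_element_dict_spec : Claim_equal_get_element_dict := by
  intro cuds key ip _ hpre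
  unfold Spec_get_element_dict get_element_dict get_element_dict_alt
  unfold Pre_get_element_dict pvPreB at hpre
  cases hcl : (PySem.Dict.mk cuds).get? "CUDS_KEYS" with
  | none => rw [hcl] at hpre; try simp at hpre
  | some cl =>
  rw [hcl] at hpre
  try dsimp only at hpre ⊢
  cases hk2 : (PySem.Dict.mk (cl.map (fun p => (p.1, PySem.Dict.mk p.2)))).get? key with
  | none => rw [hk2] at hpre; try simp at hpre
  | some kd =>
  rw [hk2] at hpre
  try dsimp only at hpre ⊢
  cases hgp : kd.get? "parent" with
  | none => rw [hgp] at hpre; try simp at hpre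
  | some pn =>
  rw [hgp] at hpre
  try dsimp only at hpre ⊢
  simp only [Bool.and_eq_true, decide_eq_true_eq, List.all_eq_true] at hpre
  obtain ⟨⟨_, hall⟩, hchain⟩ := hpre
  have hall' : ∀ p ∈ cuds, ∀ q ∈ p.2, (q.2.map Prod.fst).Nodup := by
    intro p hp q hq
    exact (((hall p hp).2) q hq)
  have hndkd : kd.keys.Nodup :=
    pv_cuds_nodup cuds cl hall' hcl key kd hk2
  cases ip with
  | false =>
    try dsimp only
    rw [pv_insert_self kd pn hgp hndkd]
    rfl
  | true =>
    try dsimp only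
    simp only [Bool.not_true, Bool.false_or, decide_eq_true_eq] at hchain
    obtain ⟨rest, hrest⟩ := Option.isSome_iff_exists.mp
      ((pv_chain_iff _ _ pn).mpr hchain)
    rw [show kd.pop? "parent" = some (pn, kd.erase "parent") by simp [PySem.Dict.pop?, hgp]]
    try dsimp only
    rw [pv_loop_eq _ _ pn (kd.erase "parent")
      (pv_contains_erase_self kd), hrest]
    dsimp only [Option.map_some]
    rw [List.foldl_cons]
    have hstart : pvMerge (PySem.Dict.mk (cl.map (fun p => (p.1, PySem.Dict.mk p.2))))
        PySem.Dict.empty key = kd.erase "parent" := by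
      unfold pvMerge
      rw [hk2]
      dsimp only
      have hfoldl : kd.items.foldl
          (fun r kv => if kv.1 = "parent" then r else r.setdefault kv.1 kv.2)
          PySem.Dict.empty = kd.items.foldl pvSdSkip PySem.Dict.empty := rfl
      rw [hfoldl, pv_skip_from_empty kd.items PySem.Dict.empty (by intro p _; rfl) hndkd]
      rfl
    rw [hstart]
    rfl
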